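-- pv_equiv track=rewrite | github.com/eoc940/Python-data_structure-and-algorithm_PS | programmers-algorythm/Hash/star_array.py | solution
-- ===== SOURCE A (Python) =====
-- from collections import defaultdict
--
-- def solution(a):
--     answer = 0
--     num_loca = defaultdict(list)
--     for i, num in enumerate(a):
--         num_loca[num].append(i)
--
--     num_loca_list = list()
--     for key, val in num_loca.items():
--         num_loca_list.append([key, val])
--
--     num_loca_list.sort(key=lambda x : len(x[1]), reverse=True)
--
--     for key, val in num_loca_list:
--         if len(val) * 2 <= answer:
--             break
--         ch = [0 for _ in range(len(a))]
--         total = 0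
--         for idx in val:
--             # 왼쪽 수를 체크
--             if 0 <= idx-1 and ch[idx-1] == 0 and a[idx-1] != key:
--                 ch[idx] = 1
--                 ch[idx-1] = 1
--                 total += 2
--             # 오른쪽 수를 체크
--             elif idx+1 < len(a) and ch[idx+1] == 0 and a[idx+1] != key:
--                 ch[idx] = 1
--                 ch[idx+1] = 1
--                 total += 2
--
--         answer = max(answer, total)
--
--     return answer
-- ===== SOURCE B (Python) =====
-- from collections import Counter
--
-- def solution(a):
--     n = len(a)
--     cnt = Counter(a)
--     best = 0
--     for key in cnt:
--         if 2 * cnt[key] <= best: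
--             continue
--         used = [0] * n
--         total = 0
--         for idx in range(n):
--             if a[idx] == key:
--                 if idx - 1 >= 0 and used[idx - 1] == 0 and a[idx - 1] != key:
--                     used[idx] = 1
--                     used[idx - 1] = 1
--                     total += 2
--                 elif idx + 1 < n and used[idx + 1] == 0 and a[idx + 1] != key:
--                     used[idx] = 1
--                     used[idx + 1] = 1
--                     total += 2
--         best = max(best, total)
--     return best
-- ===== Notes on version B (the rewrite author's own statement) =====
-- stated objective: simpler
-- what changed: B drops A's index-locations dict and frequency sort: it builds only a Counter and, for each distinct value whose count can still beat the running max, rescans the array index by index applying the same greedy neighbor pairing; per-key independence makes key order and the dropped sort irrelevant to the max.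
import Mathlib
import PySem

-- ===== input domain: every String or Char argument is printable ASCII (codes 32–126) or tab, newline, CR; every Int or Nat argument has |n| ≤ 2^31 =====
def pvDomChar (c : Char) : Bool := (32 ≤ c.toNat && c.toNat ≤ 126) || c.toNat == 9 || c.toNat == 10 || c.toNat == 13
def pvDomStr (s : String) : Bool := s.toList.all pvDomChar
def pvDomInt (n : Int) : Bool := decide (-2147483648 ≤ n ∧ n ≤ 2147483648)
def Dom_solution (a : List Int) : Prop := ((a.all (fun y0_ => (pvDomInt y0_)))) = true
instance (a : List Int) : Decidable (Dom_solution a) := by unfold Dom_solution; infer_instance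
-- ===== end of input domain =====

-- B replaces A's index-table dict + frequency sort + early-exit pruning by a plain rescan of the
-- array per distinct value (same greedy pairing, running max): simpler, not faster.

-- ===== PORT A =====
-- greedy pairing step for one occurrence idx of key (body of A's inner for-loop);
-- idx comes from enumerate so 0 ≤ idx < len a, and the neighbor accesses are guarded in range,
-- so pyGetD / List.set with .toNat are exact here
def stepA (a : List Int) (key : Int) (st : List Int × Int) (idx : Int) : List Int × Int :=
  if 0 ≤ idx - 1 ∧ PySem.List.pyGetD st.1 (idx - 1) 0 = 0 ∧ PySem.List.pyGetD a (idx - 1) 0 ≠ key then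
    ((st.1.set idx.toNat 1).set (idx - 1).toNat 1, st.2 + 2)
  else if idx + 1 < (a.length : Int) ∧ PySem.List.pyGetD st.1 (idx + 1) 0 = 0 ∧ PySem.List.pyGetD a (idx + 1) 0 ≠ key then
    ((st.1.set idx.toNat 1).set (idx + 1).toNat 1, st.2 + 2)
  else st

-- A's inner loop: ch = [0]*len(a); total = 0; for idx in val: …
def totalA (a : List Int) (key : Int) (val : List Int) : Int :=
  (val.foldl (stepA a key) (List.replicate a.length 0, 0)).2

-- A's outer loop with the 'break' (len(val)*2 <= answer)
def loopA (a : List Int) : List (Int × List Int) → Int → Int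
  | [], answer => answer
  | (key, val) :: rest, answer =>
      if (val.length : Int) * 2 ≤ answer then answer
      else loopA a rest (max answer (totalA a key val))

def solution (a : List Int) : Int :=
  let numLoca : PySem.Dict Int (List Int) :=
    (PySem.List.enumerate a 0).foldl (fun d p => d.modify p.2 [] (· ++ [p.1])) PySem.Dict.empty
  let numLocaList := numLoca.items
  let sortedList := PySem.List.sorted numLocaList (fun x => x.2.length) (reverse := true)
  loopA a sortedList 0

-- ===== PORT B =====
-- greedy pairing step (body of the nested ifs once a[idx] == key); accesses guarded in range as above
def stepB (a : List Int) (key : Int) (st : List Int × Int) (idx : Int) : List Int × Int :=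
  if 0 ≤ idx - 1 ∧ PySem.List.pyGetD st.1 (idx - 1) 0 = 0 ∧ PySem.List.pyGetD a (idx - 1) 0 ≠ key then
    ((st.1.set idx.toNat 1).set (idx - 1).toNat 1, st.2 + 2)
  else if idx + 1 < (a.length : Int) ∧ PySem.List.pyGetD st.1 (idx + 1) 0 = 0 ∧ PySem.List.pyGetD a (idx + 1) 0 ≠ key then
    ((st.1.set idx.toNat 1).set (idx + 1).toNat 1, st.2 + 2)
  else st

-- B's inner loop: used = [0]*n; total = 0; for idx in range(n): if a[idx] == key: …
def totalB (a : List Int) (key : Int) : Int :=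
  ((PySem.List.pyRange 0 (a.length : Int) 1).foldl
    (fun st idx => if PySem.List.pyGetD a idx 0 = key then stepB a key st idx else st)
    (List.replicate a.length 0, 0)).2

-- cnt = Counter(a); for key in cnt: skip if 2*cnt[key] <= best, else rescan
def solution_alt (a : List Int) : Int :=
  (PySem.Dict.counter a).keys.foldl (fun best key =>
    if 2 * (PySem.Dict.counter a).getD key 0 ≤ best then best
    else max best (totalB a key)) 0

-- ===== PRECONDITION & SPEC =====
def Spec_solution (a : List Int) (out : Int) : Prop := out = solution_alt a
instance (a : List Int) (out : Int) : Decidable (Spec_solution a out) := by unfold Spec_solution; infer_instance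

-- ===== CLAIM (what is proved, stated in full; the proofs are below) =====
def Claim_equal_solution : Prop := ∀ (a : List Int), Dom_solution a → Spec_solution a (solution a)

-- ===== LEMMAS AND PROOFS =====

theorem stepA_eq_stepB : stepA = stepB := rfl

-- the list of positions of key, as B traverses them
def posOf (a : List Int) (key : Int) : List Int :=
  (PySem.List.pyRange 0 (a.length : Int) 1).filter (fun j => PySem.List.pyGetD a j 0 == key)

theorem posOf_eq_enum (a : List Int) (k : Int) :
    posOf a k = ((PySem.List.enumerate a 0).filter (fun p => p.2 == k)).map (·.1) := by
  rw [PySem.List.enumerate_eq_map_pyRange (d := 0)]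
  unfold posOf
  simp [List.filter_map, Function.comp_def, List.map_map, PySem.List.len]

theorem len_posOf (a : List Int) (k : Int) : (posOf a k).length = a.count k := by
  rw [posOf_eq_enum]
  simp only [List.length_map, ← List.countP_eq_length_filter]
  rw [show (fun (p : Int × Int) => p.2 == k) = ((fun x => x == k) ∘ Prod.snd) from rfl,
    ← List.countP_map, PySem.List.map_snd_enumerate]
  rfl

theorem totalB_eq_totalA (a : List Int) (key : Int) :
    totalB a key = totalA a key (posOf a key) := by
  unfold totalB totalA posOf
  rw [List.foldl_filter]
  simp [stepA_eq_stepB, beq_iff_eq]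

-- each greedy step adds at most 2 to total
theorem totalA_foldl_le (a : List Int) (key : Int) :
    ∀ (val : List Int) (ch : List Int) (t : Int),
      (val.foldl (stepA a key) (ch, t)).2 ≤ t + 2 * val.length := by
  intro val
  induction val with
  | nil => intro ch t; simp
  | cons idx rest ih =>
      intro ch t
      simp only [List.foldl_cons, List.length_cons]
      have hle : (stepA a key (ch, t) idx).2 ≤ t + 2 := by
        unfold stepA; split_ifs <;> simp
      have h2 := ih (stepA a key (ch, t) idx).1 (stepA a key (ch, t) idx).2
      rw [Prod.mk.eta] at h2
      push_cast at h2 ⊢; omega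

theorem totalA_le (a : List Int) (key : Int) (val : List Int) :
    totalA a key val ≤ 2 * val.length := by
  have := totalA_foldl_le a key val (List.replicate a.length 0) 0
  simpa using this

theorem foldl_max_absorb (g : Int × List Int → Int) :
    ∀ (l : List (Int × List Int)) (ans : Int), (∀ e ∈ l, g e ≤ ans) →
      l.foldl (fun b e => max b (g e)) ans = ans := by
  intro l
  induction l with
  | nil => intro ans _; rfl
  | cons e rest ih =>
      intro ans h
      simp only [List.foldl_cons]
      rw [max_eq_left (h e (by simp))]
      exact ih ans (fun e' he' => h e' (by simp [he']))

-- the break never changes the running max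
theorem loopA_eq_foldl (a : List Int) :
    ∀ (l : List (Int × List Int)) (ans : Int),
      l.Pairwise (fun x y => y.2.length ≤ x.2.length) →
      loopA a l ans = l.foldl (fun b e => max b (totalA a e.1 e.2)) ans := by
  intro l
  induction l with
  | nil => intro ans _; rfl
  | cons e rest ih =>
      intro ans hp
      obtain ⟨key, val⟩ := e
      rw [List.pairwise_cons] at hp
      simp only [loopA, List.foldl_cons]
      split_ifs with hb
      · -- break: every later total is ≤ ans
        have h1 : max ans (totalA a key val) = ans :=
          max_eq_left (le_trans (totalA_le a key val) (by omega))
        rw [h1]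
        exact (foldl_max_absorb _ rest ans (fun e' he' => by
          have hlen := hp.1 e' he'
          have h2 := totalA_le a e'.1 e'.2
          have h3 : (e'.2.length : Int) ≤ (val.length : Int) := by exact_mod_cast hlen
          push_cast at hb h2 ⊢
          omega)).symm
      · exact ih (max ans (totalA a key val)) hp.2

theorem foldl_max_perm (g : Int × List Int → Int) {l₁ l₂ : List (Int × List Int)}
    (h : l₁.Perm l₂) (ans : Int) :
    l₁.foldl (fun b e => max b (g e)) ans = l₂.foldl (fun b e => max b (g e)) ans := by
  haveI : RightCommutative (fun (b : Int) (e : Int × List Int) => max b (g e)) :=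
    ⟨fun b x y => max_right_comm b (g x) (g y)⟩
  exact h.foldl_eq ans

-- the dict's value at key k is exactly posOf a k
theorem getD_numLoca (a : List Int) (k : Int) :
    ((PySem.List.enumerate a 0).foldl (fun d p => d.modify p.2 [] (· ++ [p.1]))
      (PySem.Dict.empty : PySem.Dict Int (List Int))).getD k [] = posOf a k := by
  have hswap :
      (PySem.List.enumerate a 0).foldl (fun d p => d.modify p.2 [] (· ++ [p.1]))
        (PySem.Dict.empty : PySem.Dict Int (List Int))
      = ((PySem.List.enumerate a 0).map Prod.swap).foldl
          (fun d p => d.modify p.1 [] (· ++ [p.2])) PySem.Dict.empty := by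
    rw [List.foldl_map]; rfl
  rw [hswap, PySem.Dict.getD_foldl_modify_append, posOf_eq_enum]
  simp [List.filter_map, List.map_map, Function.comp_def, Prod.swap]

theorem keys_numLoca (a : List Int) :
    ((PySem.List.enumerate a 0).foldl (fun d p => d.modify p.2 [] (· ++ [p.1]))
      (PySem.Dict.empty : PySem.Dict Int (List Int))).keys = PySem.List.dedup a := by
  rw [show (fun (d : PySem.Dict Int (List Int)) (p : Int × Int) => d.modify p.2 [] (· ++ [p.1]))
        = (fun d p => d.modify ((·.2) p) [] ((fun (_ : PySem.Dict Int (List Int)) (_ : Int × Int) => (· ++ [p.1])) d p)) from rfl]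
  rw [PySem.Dict.keys_foldl_modify_key]
  simp [PySem.List.map_snd_enumerate, PySem.Set.ofList, PySem.Set.update]

theorem nodup_keys_numLoca (a : List Int) :
    ((PySem.List.enumerate a 0).foldl (fun d p => d.modify p.2 [] (· ++ [p.1]))
      (PySem.Dict.empty : PySem.Dict Int (List Int))).keys.Nodup := by
  rw [keys_numLoca]; exact PySem.List.nodup_dedup a

-- ===== VERDICT (by name: the statement is the Claim_ definition above) =====
theorem solution_spec : Claim_equal_solution := by
  intro a _
  unfold Spec_solution solution solution_alt
  set d := (PySem.List.enumerate a 0).foldl (fun d p => d.modify p.2 [] (· ++ [p.1]))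
      (PySem.Dict.empty : PySem.Dict Int (List Int)) with hd
  have hitems : d.items = (PySem.List.dedup a).map (fun k => (k, posOf a k)) := by
    rw [PySem.Dict.items_eq_map_keys d (nodup_keys_numLoca a) []]
    rw [keys_numLoca]
    exact List.map_congr_left (fun k _ => by rw [getD_numLoca])
  rw [loopA_eq_foldl a _ _ (by
    have := PySem.List.sorted_pairwise_rev (xs := d.items) (key := fun x => x.2.length)
    exact this)]
  rw [foldl_max_perm (fun e => totalA a e.1 e.2) (PySem.List.sorted_perm _ _ _) 0]
  rw [hitems, List.foldl_map]
  have hfun : (fun (b : Int) (k : Int) => max b (totalA a (k, posOf a k).1 (k, posOf a k).2))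
      = fun b k => if 2 * (PySem.Dict.counter a).getD k 0 ≤ b then b
                   else max b (totalB a k) := by
    funext b k
    dsimp only
    have hle : totalB a k ≤ 2 * ((a.count k : Int)) := by
      rw [totalB_eq_totalA]
      have h := totalA_le a k (posOf a k)
      rw [len_posOf] at h
      omega
    rw [PySem.Dict.getD_counter, totalB_eq_totalA] at *
    split_ifs with h
    · exact max_eq_left (by omega)
    · rfl
  rw [hfun]
  have hkeys : (PySem.Dict.counter a).keys = PySem.List.dedup a := by
    rw [PySem.Dict.keys_counter]; simp
  rw [hkeys]
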